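-- pv_equiv track=rewrite | github.com/kuanghy/dnspx | scripts/update-adhosts.py | filter_by_whitelist
-- ===== SOURCE A (Python) =====
-- def filter_by_whitelist(domains, whitelist):
--     """根据白名单过滤域名
--
--     白名单中的域名及其子域名都会被过滤掉
--     例如白名单包含 "example.com"，则 "example.com" 和 "sub.example.com" 都会被过滤
--     """
--     if not whitelist:
--         return domains
--
--     filtered = set()
--     for domain in domains:
--         is_whitelisted = False
--         for wl_domain in whitelist:
--             # 完全匹配或子域名匹配
--             if domain == wl_domain or domain.endswith('.' + wl_domain):
--                 is_whitelisted = True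
--                 break
--         if not is_whitelisted:
--             filtered.add(domain)
--     return filtered
-- ===== SOURCE B (Python) =====
-- def filter_by_whitelist(domains, whitelist):
--     """根据白名单过滤域名 — whitelist as a hash set; each domain only tests
--     itself and its dot-suffixes for membership (O(labels) instead of O(|whitelist|))."""
--     if not whitelist:
--         return domains
--     wl = set(whitelist)
--     filtered = set()
--     for domain in domains:
--         if not any(s in wl for s in _suffix_candidates(domain)):
--             filtered.add(domain)
--     return filtered
--
--
-- def _suffix_candidates(domain):
--     """The domain itself and every suffix that follows a '.'."""
--     out = [domain]
--     for i, ch in enumerate(domain):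
--         if ch == '.':
--             out.append(domain[i + 1:])
--     return out
-- ===== Notes on version B (the rewrite author's own statement) =====
-- stated objective: faster
-- what changed: Instead of testing every domain against every whitelist entry with endswith, B puts the whitelist in a hash set and for each domain checks only the domain and its dot-suffixes for membership.
import Mathlib
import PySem

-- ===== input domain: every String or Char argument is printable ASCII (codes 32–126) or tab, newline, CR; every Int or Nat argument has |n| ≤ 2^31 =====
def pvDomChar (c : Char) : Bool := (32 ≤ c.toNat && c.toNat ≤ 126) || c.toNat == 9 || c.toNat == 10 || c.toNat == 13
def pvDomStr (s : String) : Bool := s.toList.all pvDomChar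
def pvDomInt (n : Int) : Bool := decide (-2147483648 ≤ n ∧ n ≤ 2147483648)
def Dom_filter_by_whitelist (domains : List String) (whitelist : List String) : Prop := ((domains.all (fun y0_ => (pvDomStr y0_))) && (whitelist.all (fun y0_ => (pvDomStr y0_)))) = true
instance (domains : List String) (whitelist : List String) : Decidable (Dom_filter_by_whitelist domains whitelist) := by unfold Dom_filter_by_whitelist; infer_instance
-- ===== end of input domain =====

-- B replaces the O(D·W) scan of the whole whitelist per domain by a whitelist set
-- probed only at the domain and its dot-suffixes (objective: faster).


-- ===== PORT A =====
-- literal port: for each domain scan the whole whitelist, testing equality or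
-- endswith('.' + wl); collect the non-matching domains into a set (insertion order).
def filter_by_whitelist (domains : List String) (whitelist : List String) : List String :=
  if whitelist = [] then domains
  else
    domains.foldl
      (fun filtered domain =>
        if whitelist.any (fun wl => domain == wl ||
            PySem.Chars.endswith domain.toList ('.' :: wl.toList)) then
          filtered
        else
          PySem.Set.add filtered domain)
      (PySem.Set.empty : PySem.Set String)

-- ===== PORT B =====
-- the domain itself and every suffix that follows a '.' (B's _suffix_candidates)
def pvSuffAfterDot : List Char → List (List Char)
  | [] => []
  | c :: rest => if c = '.' then rest :: pvSuffAfterDot rest else pvSuffAfterDot rest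

def filter_by_whitelist_alt (domains : List String) (whitelist : List String) : List String :=
  if whitelist = [] then domains
  else
    let wl : PySem.Set (List Char) := PySem.Set.ofList (whitelist.map String.toList)
    domains.foldl
      (fun filtered domain =>
        if (domain.toList :: pvSuffAfterDot domain.toList).any
            (fun s => PySem.Set.contains wl s) then
          filtered
        else
          PySem.Set.add filtered domain)
      (PySem.Set.empty : PySem.Set String)

-- ===== PRECONDITION & SPEC =====
def Spec_filter_by_whitelist (domains : List String) (whitelist : List String) (out : List String) : Prop := out = filter_by_whitelist_alt domains whitelist
instance (domains : List String) (whitelist : List String) (out : List String) : Decidable (Spec_filter_by_whitelist domains whitelist out) := by unfold Spec_filter_by_whitelist; infer_instance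

-- ===== CLAIM (what is proved, stated in full; the proofs are below) =====
def Claim_equal_filter_by_whitelist : Prop := ∀ (domains : List String) (whitelist : List String), Dom_filter_by_whitelist domains whitelist → Spec_filter_by_whitelist domains whitelist (filter_by_whitelist domains whitelist)

-- ===== LEMMAS AND PROOFS =====

-- '.'++w is a suffix of d  ↔  w is one of d's after-a-dot suffixes
lemma mem_pvSuffAfterDot_iff (d w : List Char) :
    w ∈ pvSuffAfterDot d ↔ ('.' :: w) <:+ d := by
  induction d with
  | nil => simp [pvSuffAfterDot]
  | cons c rest ih =>
    rw [List.suffix_cons_iff]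
    by_cases hc : c = '.'
    · subst hc
      simp [pvSuffAfterDot, ih, List.cons.injEq]
    · simp [pvSuffAfterDot, hc, ih, List.cons.injEq, Ne.symm hc]

-- the two per-domain tests agree
lemma pred_eq (whitelist : List String) (d : String) :
    (whitelist.any (fun wl => d == wl ||
        PySem.Chars.endswith d.toList ('.' :: wl.toList)))
    = ((d.toList :: pvSuffAfterDot d.toList).any
        (fun s => PySem.Set.contains (PySem.Set.ofList (whitelist.map String.toList)) s)) := by
  rw [Bool.eq_iff_iff]
  simp only [List.any_eq_true, Bool.or_eq_true, beq_iff_eq,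
    PySem.Chars.endswith_iff, PySem.Set.contains_iff, PySem.Set.mem_ofList,
    List.mem_map, List.mem_cons, mem_pvSuffAfterDot_iff]
  constructor
  · rintro ⟨wl, hwl, heq | hs⟩
    · exact ⟨wl.toList, Or.inl (by rw [heq]), wl, hwl, rfl⟩
    · exact ⟨wl.toList, Or.inr hs, wl, hwl, rfl⟩
  · rintro ⟨s, hs, wl, hwl, rfl⟩
    rcases hs with hs | hs
    · exact ⟨wl, hwl, Or.inl (String.toList_injective hs.symm)⟩
    · exact ⟨wl, hwl, Or.inr hs⟩

-- ===== VERDICT (by name: the statement is the Claim_ definition above) =====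
theorem filter_by_whitelist_spec : Claim_equal_filter_by_whitelist := by
  intro domains whitelist _
  show filter_by_whitelist domains whitelist = filter_by_whitelist_alt domains whitelist
  unfold filter_by_whitelist filter_by_whitelist_alt
  by_cases h : whitelist = []
  · simp [h]
  · simp only [if_neg h]
    congr 1
    funext filtered domain
    rw [pred_eq]
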